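-- pv_equiv track=rewrite | github.com/wangqioo/nervus-v1 | core/arbor/nervus_platform/apps/registry.py | _subject_matches
-- ===== SOURCE A (Python) =====
-- def _subject_matches(subject: str, pattern: str) -> bool:
--     if pattern == subject:
--         return True
--     if pattern.endswith(">"):
--         return subject.startswith(pattern[:-1])
--     subject_parts = subject.split(".")
--     pattern_parts = pattern.split(".")
--     if len(subject_parts) != len(pattern_parts):
--         return False
--     return all(pattern == "*" or pattern == part for part, pattern in zip(subject_parts, pattern_parts))
-- ===== SOURCE B (Python) =====
-- def _subject_matches(subject: str, pattern: str) -> bool: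
--     # '>' suffix: literal prefix match; otherwise match token lists recursively,
--     # '*' matching any single token. No equality fast path, no length pre-check:
--     # the recursion handles both.
--     if pattern.endswith(">"):
--         return subject.startswith(pattern[:-1])
--
--     def go(sp, pp):
--         if not sp and not pp:
--             return True
--         if not sp or not pp:
--             return False
--         return (pp[0] == "*" or pp[0] == sp[0]) and go(sp[1:], pp[1:])
--
--     return go(subject.split("."), pattern.split("."))
-- ===== Notes on version B (the rewrite author's own statement) =====
-- stated objective: alternative
-- what changed: Replaces A's equality fast-path plus length check plus zip/all scan with a single simultaneous recursion over the two token lists (the recursion itself detects length mismatch, and equal strings match token-by-token).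
import Mathlib
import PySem

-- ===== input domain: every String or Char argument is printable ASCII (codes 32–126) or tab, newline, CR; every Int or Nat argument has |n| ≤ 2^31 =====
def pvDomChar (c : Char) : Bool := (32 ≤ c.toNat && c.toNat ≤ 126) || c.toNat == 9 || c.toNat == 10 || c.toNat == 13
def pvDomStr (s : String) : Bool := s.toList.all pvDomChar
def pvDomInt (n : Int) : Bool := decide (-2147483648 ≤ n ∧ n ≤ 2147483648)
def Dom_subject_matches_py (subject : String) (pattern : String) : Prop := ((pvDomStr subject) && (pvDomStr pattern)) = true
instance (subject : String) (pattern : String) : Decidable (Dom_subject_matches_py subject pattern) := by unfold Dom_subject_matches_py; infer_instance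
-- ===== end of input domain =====

-- B replaces A's equality fast-path + length check + zip/all scan with one
-- simultaneous recursion over the two token lists (objective: alternative).

-- ===== PORT A =====
def subject_matches_py (subject : String) (pattern : String) : Bool :=
  if pattern == subject then true
  else if PySem.Str.endswith pattern ">" then
    PySem.Str.startswith subject (PySem.Str.slice pattern none (some (-1)))
  else
    let subject_parts := PySem.Chars.splitOn subject.toList ['.']
    let pattern_parts := PySem.Chars.splitOn pattern.toList ['.']
    if subject_parts.length ≠ pattern_parts.length then false
    else (subject_parts.zip pattern_parts).all (fun pr => pr.2 == ['*'] || pr.2 == pr.1)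

-- ===== PORT B =====
def pvMatchTokens : List (List Char) → List (List Char) → Bool
  | [], [] => true
  | _ :: _, [] => false
  | [], _ :: _ => false
  | s :: sp, p :: pp => (p == ['*'] || p == s) && pvMatchTokens sp pp

def subject_matches_py_alt (subject : String) (pattern : String) : Bool :=
  if PySem.Str.endswith pattern ">" then
    PySem.Str.startswith subject (PySem.Str.slice pattern none (some (-1)))
  else
    pvMatchTokens (PySem.Chars.splitOn subject.toList ['.'])
                  (PySem.Chars.splitOn pattern.toList ['.'])

-- ===== PRECONDITION & SPEC =====
def Spec_subject_matches_py (subject : String) (pattern : String) (out : Bool) : Prop := out = subject_matches_py_alt subject pattern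
instance (subject : String) (pattern : String) (out : Bool) : Decidable (Spec_subject_matches_py subject pattern out) := by unfold Spec_subject_matches_py; infer_instance

-- ===== CLAIM (what is proved, stated in full; the proofs are below) =====
def Claim_equal_subject_matches_py : Prop := ∀ (subject : String) (pattern : String), Dom_subject_matches_py subject pattern → Spec_subject_matches_py subject pattern (subject_matches_py subject pattern)

-- ===== LEMMAS AND PROOFS =====

-- matching a token list against itself succeeds
theorem pvMatchTokens_self (l : List (List Char)) : pvMatchTokens l l = true := by
  induction l with
  | nil => rfl
  | cons h t ih => simp [pvMatchTokens, ih]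

-- the recursion equals A's length check + zip/all scan
theorem pvMatchTokens_eq (sp pp : List (List Char)) :
    pvMatchTokens sp pp =
      (if sp.length ≠ pp.length then false
       else (sp.zip pp).all (fun pr => pr.2 == ['*'] || pr.2 == pr.1)) := by
  induction sp generalizing pp with
  | nil => cases pp <;> simp [pvMatchTokens]
  | cons s st ih =>
    cases pp with
    | nil => simp [pvMatchTokens]
    | cons p pt =>
      simp only [pvMatchTokens, ih pt, List.zip_cons_cons, List.all_cons,
        List.length_cons]
      by_cases hl : st.length = pt.length <;> simp [hl, Bool.and_comm]

-- ===== VERDICT (by name: the statement is the Claim_ definition above) =====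
theorem subject_matches_py_spec : Claim_equal_subject_matches_py := by
  intro subject pattern _
  unfold Spec_subject_matches_py subject_matches_py subject_matches_py_alt
  by_cases he : pattern == subject
  · have heq : pattern = subject := by simpa using he
    subst heq
    simp only [he, if_true]
    by_cases hgt : PySem.Str.endswith pattern ">"
    · rw [if_pos hgt]
      have hpre : (PySem.Str.slice pattern none (some (-1))).toList <+: pattern.toList := by
        rw [PySem.Str.slice_to_neg_one]; exact List.dropLast_prefix _
      simp only [PySem.Str.startswith_eq]
      exact ((PySem.Chars.startswith_iff _ _).mpr hpre).symm
    · rw [if_neg hgt]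
      exact (pvMatchTokens_self _).symm
  · simp only [he, Bool.false_eq_true, if_false]
    by_cases hgt : PySem.Str.endswith pattern ">"
    · rw [if_pos hgt, if_pos hgt]
    · rw [if_neg hgt, if_neg hgt, pvMatchTokens_eq]
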